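-- pv_equiv track=rewrite | github.com/MulongXie/Research-ReverselyGeneratingWebCode | code/WORKPLACE/xianyu/test.py | boundary_get_boundary
-- ===== SOURCE A (Python) =====
-- def boundary_get_boundary(area):
--     border_up, border_bottom, border_left, border_right = {}, {}, {}, {}
--     for point in area:
--         # point: (row_index, column_index)
--         # up, bottom: (column_index, min/max row border) detect range of each column
--         if point[1] not in border_up or border_up[point[1]] > point[0]:
--             border_up[point[1]] = point[0]
--         if point[1] not in border_bottom or border_bottom[point[1]] < point[0]:
--             border_bottom[point[1]] = point[0]
--         # left, right: (row_index, min/max column border) detect range of each row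
--         if point[0] not in border_left or border_left[point[0]] > point[1]:
--             border_left[point[0]] = point[1]
--         if point[0] not in border_right or border_right[point[0]] < point[1]:
--             border_right[point[0]] = point[1]
--
--     boundary = [border_up, border_bottom, border_left, border_right]
--     # descending sort
--     for i in range(len(boundary)):
--         boundary[i] = [[k, boundary[i][k]] for k in boundary[i].keys()]
--         boundary[i] = sorted(boundary[i], key=lambda x: x[0])
--     return boundary
-- ===== SOURCE B (Python) =====
-- def boundary_get_boundary(area):
--     # B: group-then-reduce — collect each column's rows / each row's columns first,
--     # then take min/max per group; same return value as the running-min/max version.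
--     col_to_rows, row_to_cols = {}, {}
--     for point in area:
--         r, c = point[0], point[1]
--         col_to_rows.setdefault(c, []).append(r)
--         row_to_cols.setdefault(r, []).append(c)
--
--     def emit(groups, reduce):
--         return sorted([[k, reduce(v)] for k, v in groups.items()], key=lambda x: x[0])
--
--     return [emit(col_to_rows, min), emit(col_to_rows, max),
--             emit(row_to_cols, min), emit(row_to_cols, max)]
-- ===== Notes on version B (the rewrite author's own statement) =====
-- stated objective: alternative
-- what changed: B separates grouping from reduction: one pass builds col->rows and row->cols lists, then min/max is taken per group and the four [key, value] lists are emitted sorted by key, instead of A's four inline running-min/max dictionaries.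
import Mathlib
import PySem

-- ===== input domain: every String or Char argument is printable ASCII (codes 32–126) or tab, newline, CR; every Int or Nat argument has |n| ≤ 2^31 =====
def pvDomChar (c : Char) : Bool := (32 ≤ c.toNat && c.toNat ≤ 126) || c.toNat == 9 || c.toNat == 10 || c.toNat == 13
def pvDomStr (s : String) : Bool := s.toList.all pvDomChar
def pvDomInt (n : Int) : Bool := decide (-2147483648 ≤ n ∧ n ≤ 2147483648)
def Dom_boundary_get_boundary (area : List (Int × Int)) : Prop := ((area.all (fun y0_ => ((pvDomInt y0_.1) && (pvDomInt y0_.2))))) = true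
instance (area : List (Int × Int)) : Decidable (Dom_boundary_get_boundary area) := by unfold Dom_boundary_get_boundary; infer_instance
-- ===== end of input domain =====

-- B differs from A by decomposition only (group then reduce vs running min/max); same return value, no speed claim.

-- ===== PORT A =====
-- One conditional-overwrite step, the common shape of A's four `if … not in … or …: d[…] = …` statements:
-- `better old new` is the Python comparison (`>` for the min dicts, `<` for the max dicts); kf/vf pick the
-- key/value component of the point.  When the key is absent Python short-circuits the `or`; here the `getD … 0`
-- is then dead (the `||` is already true), so the value 0 is never compared.
def bgbStep (better : Int → Int → Bool) (kf vf : Int × Int → Int) (d : PySem.Dict Int Int)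
    (p : Int × Int) : PySem.Dict Int Int :=
  if !(d.contains (kf p)) || better (d.getD (kf p) 0) (vf p) then d.insert (kf p) (vf p) else d

def boundary_get_boundary (area : List (Int × Int)) : List (List (List Int)) :=
  -- border_up, border_bottom, border_left, border_right updated in one pass, as in A
  let st := area.foldl
    (fun st point =>
      (bgbStep (fun old new => decide (old > new)) (fun p => p.2) (fun p => p.1) st.1 point,
       bgbStep (fun old new => decide (old < new)) (fun p => p.2) (fun p => p.1) st.2.1 point,
       bgbStep (fun old new => decide (old > new)) (fun p => p.1) (fun p => p.2) st.2.2.1 point,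
       bgbStep (fun old new => decide (old < new)) (fun p => p.1) (fun p => p.2) st.2.2.2 point))
    (PySem.Dict.empty, PySem.Dict.empty, PySem.Dict.empty, PySem.Dict.empty)
  -- boundary[i] = sorted([[k, boundary[i][k]] for k in boundary[i].keys()], key=lambda x: x[0])
  -- (k ranges over the keys, so Python's d[k] never raises; getD k 0 is exact there)
  [st.1, st.2.1, st.2.2.1, st.2.2.2].map
    (fun d => PySem.List.sorted (d.keys.map (fun k => [k, d.getD k 0]))
      (fun x => PySem.List.pyGetD x 0 0) false)

-- ===== PORT B =====
-- min(v) / max(v); the groups built below are never empty, so Python's min/max never raises (getD 0 is dead)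
def bgbMin (v : List Int) : Int := (PySem.List.min? v (fun x => x)).getD 0
def bgbMax (v : List Int) : Int := (PySem.List.max? v (fun x => x)).getD 0

-- emit(groups, reduce) = sorted([[k, reduce(v)] for k, v in groups.items()], key=lambda x: x[0])
def bgbEmit (g : PySem.Dict Int (List Int)) (red : List Int → Int) : List (List Int) :=
  PySem.List.sorted (g.items.map (fun kv => [kv.1, red kv.2])) (fun x => PySem.List.pyGetD x 0 0) false

def boundary_get_boundary_alt (area : List (Int × Int)) : List (List (List Int)) :=
  -- grouping pass: d.setdefault(k, []).append(v)  =  d.modify k [] (· ++ [v])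
  let colToRows := area.foldl (fun d p => d.modify p.2 [] (fun v => v ++ [p.1])) PySem.Dict.empty
  let rowToCols := area.foldl (fun d p => d.modify p.1 [] (fun v => v ++ [p.2])) PySem.Dict.empty
  [bgbEmit colToRows bgbMin, bgbEmit colToRows bgbMax,
   bgbEmit rowToCols bgbMin, bgbEmit rowToCols bgbMax]

-- ===== PRECONDITION & SPEC =====
def Spec_boundary_get_boundary (area : List (Int × Int)) (out : List (List (List Int))) : Prop := out = boundary_get_boundary_alt area
instance (area : List (Int × Int)) (out : List (List (List Int))) : Decidable (Spec_boundary_get_boundary area out) := by unfold Spec_boundary_get_boundary; infer_instance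

-- ===== CLAIM (what is proved, stated in full; the proofs are below) =====
def Claim_equal_boundary_get_boundary : Prop := ∀ (area : List (Int × Int)), Dom_boundary_get_boundary area → Spec_boundary_get_boundary area (boundary_get_boundary area)

-- ===== LEMMAS AND PROOFS =====

-- A's combined 4-dict fold is the tuple of the four individual folds
theorem bgb_fold_split (f1 f2 f3 f4 : PySem.Dict Int Int → Int × Int → PySem.Dict Int Int)
    (l : List (Int × Int)) (a b c d : PySem.Dict Int Int) :
    l.foldl (fun st p => (f1 st.1 p, f2 st.2.1 p, f3 st.2.2.1 p, f4 st.2.2.2 p)) (a, b, c, d)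
      = (l.foldl f1 a, l.foldl f2 b, l.foldl f3 c, l.foldl f4 d) := by
  induction l generalizing a b c d with
  | nil => rfl
  | cons q t ih => simpa [List.foldl] using ih _ _ _ _

-- the running reduction A's conditional overwrite performs on the values of one key
def bgbRun (better : Int → Int → Bool) (o : Option Int) (rs : List Int) : Option Int :=
  rs.foldl (fun acc x => match acc with
    | none => some x
    | some m => if better m x then some x else some m) o

-- A's dict lookup after the fold = the running reduction over that key's values, in order
theorem bgb_get? (better : Int → Int → Bool) (kf vf : Int × Int → Int) :
    ∀ (l : List (Int × Int)) (d : PySem.Dict Int Int) (c : Int),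
    (l.foldl (bgbStep better kf vf) d).get? c
      = bgbRun better (d.get? c) ((l.filter (fun p => kf p == c)).map vf) := by
  intro l
  induction l with
  | nil => intro d c; rfl
  | cons q t ih =>
    intro d c
    rw [List.foldl_cons, ih]
    by_cases hk : kf q = c
    · subst hk
      simp only [List.filter_cons, beq_self_eq_true, if_pos trivial, List.map_cons]
      have hstep : (bgbStep better kf vf d q).get? (kf q)
          = (match d.get? (kf q) with
             | none => some (vf q)
             | some m => if better m (vf q) then some (vf q) else some m) := by
        unfold bgbStep
        rcases hg : d.get? (kf q) with _ | m
        · have hc : d.contains (kf q) = false := (PySem.Dict.get?_eq_none_iff_contains d _).mp hg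
          simp [hc, PySem.Dict.get?_insert_self]
        · have hc : d.contains (kf q) = true := by
            rw [PySem.Dict.contains_eq_isSome_get?, hg]; rfl
          have hgd : d.getD (kf q) 0 = m := PySem.Dict.getD_of_get?_eq_some d 0 hg
          by_cases hb : better m (vf q)
          · simp [hc, hgd, hb, PySem.Dict.get?_insert_self]
          · simp [hc, hgd, hb, hg]
      rw [hstep]
      rcases d.get? (kf q) with _ | m
      · rfl
      · by_cases hb : better m (vf q) <;> simp [hb, bgbRun]
    · have hne : (kf q == c) = false := by simp [hk]
      have hget : (bgbStep better kf vf d q).get? c = d.get? c := by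
        unfold bgbStep
        split
        · exact PySem.Dict.get?_insert_of_ne d (vf q) (Ne.symm hk)
        · rfl
      rw [hget]
      simp [hne]

-- A's dict keys after the fold = first-occurrence order of the keys seen
theorem bgb_keys (better : Int → Int → Bool) (kf vf : Int × Int → Int) :
    ∀ (l : List (Int × Int)) (d : PySem.Dict Int Int),
    (l.foldl (bgbStep better kf vf) d).keys = PySem.Set.update d.keys (l.map kf) := by
  intro l
  induction l with
  | nil => intro d; rfl
  | cons q t ih =>
    intro d
    rw [List.foldl_cons, ih, List.map_cons, PySem.Set.update_cons]
    congr 1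
    unfold bgbStep
    rcases hc : d.contains (kf q) with _ | _
    · have hm : kf q ∉ d.keys := by
        rw [PySem.Dict.contains_eq_decide_mem_keys] at hc
        simpa using hc
      simp [PySem.Dict.keys_insert_of_not_contains d _ hc, PySem.Set.add, hm]
    · have hm : kf q ∈ d.keys := by
        rw [PySem.Dict.contains_eq_decide_mem_keys] at hc
        simpa using hc
      split
      · simp [PySem.Dict.keys_insert_of_contains d _ hc, PySem.Set.add, hm]
      · simp [PySem.Set.add, hm]

-- B's grouping dict: value at a key = that key's values in order (generic in the key/value selectors)
theorem bgb_group_getD (kf vf : Int × Int → Int) (l : List (Int × Int))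
    (d : PySem.Dict Int (List Int)) (c : Int) :
    (l.foldl (fun d p => d.modify (kf p) [] (fun v => v ++ [vf p])) d).getD c []
      = d.getD c [] ++ ((l.filter (fun p => kf p == c)).map vf) := by
  have h := PySem.Dict.getD_foldl_modify_append (l.map (fun p => (kf p, vf p))) d c
  rw [List.foldl_map, List.filter_map, List.map_map] at h
  simpa [Function.comp] using h

theorem bgb_group_keys (kf vf : Int × Int → Int) (l : List (Int × Int))
    (d : PySem.Dict Int (List Int)) :
    (l.foldl (fun d p => d.modify (kf p) [] (fun v => v ++ [vf p])) d).keys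
      = PySem.Set.update d.keys (l.map kf) :=
  PySem.Dict.keys_foldl_modify_key l kf [] (fun _ p v => v ++ [vf p]) d

-- Python's min/max of a list are exactly the running reduction with A's comparison
theorem bgbMin_eq_run (vs : List Int) :
    bgbMin vs = (bgbRun (fun old new => decide (old > new)) none vs).getD 0 := by
  have h : PySem.List.min? vs (fun x => x) = bgbRun (fun old new => decide (old > new)) none vs := by
    apply PySem.List.foldl_congr_mem
    intro acc x _
    rcases acc with _ | m
    · rfl
    · by_cases hb : x < m <;> simp [hb]
  simp [bgbMin, h]

theorem bgbMax_eq_run (vs : List Int) :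
    bgbMax vs = (bgbRun (fun old new => decide (old < new)) none vs).getD 0 := by
  have h : PySem.List.max? vs (fun x => x) = bgbRun (fun old new => decide (old < new)) none vs := by
    apply PySem.List.foldl_congr_mem
    intro acc x _
    rcases acc with _ | m
    · rfl
    · by_cases hb : m < x <;> simp [hb]
  simp [bgbMax, h]

-- one component: A's [k, d[k]] list over keys = B's [k, reduce(v)] list over items
theorem bgb_comp (better : Int → Int → Bool) (kf vf : Int × Int → Int)
    (red : List Int → Int) (hred : ∀ vs, red vs = (bgbRun better none vs).getD 0)
    (l : List (Int × Int)) :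
    (l.foldl (bgbStep better kf vf) PySem.Dict.empty).keys.map
        (fun k => [k, (l.foldl (bgbStep better kf vf) PySem.Dict.empty).getD k 0])
      = ((l.foldl (fun d p => d.modify (kf p) [] (fun v => v ++ [vf p])) PySem.Dict.empty).items).map
        (fun kv => [kv.1, red kv.2]) := by
  set dA := l.foldl (bgbStep better kf vf) PySem.Dict.empty with hdA
  set dB := l.foldl (fun d p => d.modify (kf p) [] (fun v => v ++ [vf p])) PySem.Dict.empty with hdB
  have hkB : dB.keys = PySem.Set.ofList (l.map kf) := by
    rw [hdB, bgb_group_keys, PySem.Dict.keys_empty, PySem.Set.update_nil_left]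
  have hkA : dA.keys = PySem.Set.ofList (l.map kf) := by
    rw [hdA, bgb_keys, PySem.Dict.keys_empty, PySem.Set.update_nil_left]
  have hnd : dB.keys.Nodup := by rw [hkB]; exact PySem.Set.nodup_ofList _
  rw [PySem.Dict.items_eq_map_keys dB hnd ([] : List Int), List.map_map, hkA, hkB]
  apply List.map_congr_left
  intro k _
  have hvB : dB.getD k [] = (l.filter (fun p => kf p == k)).map vf := by
    rw [hdB, bgb_group_getD]; simp
  have hvA : dA.getD k 0
      = (bgbRun better none ((l.filter (fun p => kf p == k)).map vf)).getD 0 := by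
    rw [PySem.Dict.getD_eq_get?_getD, hdA, bgb_get?]
    rfl
  simp [Function.comp, hvA, hvB, hred]

-- ===== VERDICT (by name: the statement is the Claim_ definition above) =====
theorem boundary_get_boundary_spec : Claim_equal_boundary_get_boundary := by
  intro area _
  unfold Spec_boundary_get_boundary boundary_get_boundary boundary_get_boundary_alt
  rw [bgb_fold_split]
  simp only [List.map_cons, List.map_nil, bgbEmit]
  rw [bgb_comp _ _ _ bgbMin bgbMin_eq_run area,
      bgb_comp _ _ _ bgbMax bgbMax_eq_run area,
      bgb_comp _ _ _ bgbMin bgbMin_eq_run area,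
      bgb_comp _ _ _ bgbMax bgbMax_eq_run area]
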